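-- pv_equiv track=rewrite | github.com/amshrestha2020/CodeSignal | CodeSignal/Graphs/Sabotage.py | solution
-- ===== SOURCE A (Python) =====
-- def solution(hangar):
--     n, m = len(hangar), len(hangar[0])
--     dx = {'U': -1, 'D': 1, 'L': 0, 'R': 0}
--     dy = {'U': 0, 'D': 0, 'L': -1, 'R': 1}
--     visited = [[False]*m for _ in range(n)]
--     can_leave = [[False]*m for _ in range(n)]
--
--     def dfs(x, y):
--         if not (0 <= x < n and 0 <= y < m):
--             return True
--         if visited[x][y]:
--             return can_leave[x][y]
--         visited[x][y] = True
--         nx, ny = x + dx[hangar[x][y]], y + dy[hangar[x][y]]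
--         can_leave[x][y] = dfs(nx, ny)
--         return can_leave[x][y]
--
--     return sum(not dfs(i, j) for i in range(n) for j in range(m))
-- ===== SOURCE B (Python) =====
-- def solution(hangar):
--     n, m = len(hangar), len(hangar[0])
--     move = {'U': (-1, 0), 'D': (1, 0), 'L': (0, -1), 'R': (0, 1)}
--     total = n * m
--     stuck = 0
--     for i in range(n):
--         for j in range(m):
--             x, y = i, j
--             escaped = False
--             for _ in range(total):
--                 dx, dy = move[hangar[x][y]]
--                 x, y = x + dx, y + dy
--                 if not (0 <= x < n and 0 <= y < m):
--                     escaped = True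
--                     break
--             if not escaped:
--                 stuck += 1
--     return stuck
-- ===== Notes on version B (the rewrite author's own statement) =====
-- stated objective: alternative
-- what changed: Replaces A's shared-state memoized recursive DFS with cycle detection by an independent bounded pointer-chase per cell: each cell follows its unique successor for at most n*m steps and is counted as stuck iff the walk never leaves the grid within that bound.
import Mathlib
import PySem

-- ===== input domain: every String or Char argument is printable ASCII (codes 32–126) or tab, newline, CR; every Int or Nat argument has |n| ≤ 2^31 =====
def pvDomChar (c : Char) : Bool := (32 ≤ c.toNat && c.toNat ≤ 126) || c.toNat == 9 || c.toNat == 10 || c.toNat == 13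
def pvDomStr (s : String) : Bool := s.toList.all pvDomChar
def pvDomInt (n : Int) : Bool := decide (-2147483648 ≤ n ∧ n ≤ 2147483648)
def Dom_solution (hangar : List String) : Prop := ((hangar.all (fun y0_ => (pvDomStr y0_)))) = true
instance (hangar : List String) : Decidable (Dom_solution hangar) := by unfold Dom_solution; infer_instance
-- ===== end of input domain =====

-- B replaces A's shared-state memoized DFS by an independent bounded pointer-chase per cell (alternative algorithm, no speed claim).

-- ===== PORT A =====
-- shared cell helpers (used by both ports): successor cell and the bounds test
def pvInBb (n m : Nat) (c : Int × Int) : Bool :=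
  decide (0 ≤ c.1) && decide (c.1 < (n : Int)) && decide (0 ≤ c.2) && decide (c.2 < (m : Int))

-- hangar[x][y]; only evaluated on in-bounds coordinates (defaults are never reached there)
def pvCellChar (hangar : List String) (x y : Int) : Char :=
  ((hangar.getD x.toNat "").toList.getD y.toNat ' ')

def pvDx : PySem.Dict Char Int := PySem.Dict.ofList [('U', -1), ('D', 1), ('L', 0), ('R', 0)]
def pvDy : PySem.Dict Char Int := PySem.Dict.ofList [('U', 0), ('D', 0), ('L', -1), ('R', 1)]

-- (x + dx[hangar[x][y]], y + dy[hangar[x][y]]); getD 0 is a totality default, unreachable under Pre_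
def pvStep (hangar : List String) (c : Int × Int) : Int × Int :=
  (c.1 + PySem.Dict.getD pvDx (pvCellChar hangar c.1 c.2) 0,
   c.2 + PySem.Dict.getD pvDy (pvCellChar hangar c.1 c.2) 0)

-- visited / can_leave grids as lists of rows
def pvGget (g : List (List Bool)) (c : Int × Int) : Bool :=
  (g.getD c.1.toNat []).getD c.2.toNat false

def pvGset (g : List (List Bool)) (c : Int × Int) (b : Bool) : List (List Bool) :=
  g.set c.1.toNat ((g.getD c.1.toNat []).set c.2.toNat b)

-- A's memoized dfs; the fuel argument only makes the recursion structural
-- (n*m+1 fuel is always enough: each recursive call marks one more cell visited)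
def dfsA (hangar : List String) (n m : Nat) :
    Nat → (List (List Bool) × List (List Bool)) → Int → Int →
    Bool × (List (List Bool) × List (List Bool))
  | 0, st, _, _ => (false, st)
  | fuel + 1, (V, C), x, y =>
    if pvInBb n m (x, y) then
      if pvGget V (x, y) then (pvGget C (x, y), (V, C))
      else
        match dfsA hangar n m fuel (pvGset V (x, y) true, C)
            (pvStep hangar (x, y)).1 (pvStep hangar (x, y)).2 with
        | (b, (V2, C2)) => (b, (V2, pvGset C2 (x, y) b))
    else (true, (V, C))

-- one step of A's outer summation loop: run dfs on cell (i, j), add `not b`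
def pvStepA (hangar : List String) (n m : Nat) (i : Nat)
    (acc2 : Int × (List (List Bool) × List (List Bool))) (j : Nat) :
    Int × (List (List Bool) × List (List Bool)) :=
  match dfsA hangar n m (n * m + 1) acc2.2 (i : Int) (j : Int) with
  | (b, st') => (acc2.1 + (if b then 0 else 1), st')

def solution (hangar : List String) : Int :=
  let n := hangar.length
  let m := (hangar.headD "").length
  let init : List (List Bool) := List.replicate n (List.replicate m false)
  ((List.range n).foldl
    (fun acc i => (List.range m).foldl (pvStepA hangar n m i) acc)
    ((0 : Int), (init, init))).1

-- ===== PORT B =====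
-- follow the unique successor for at most k moves; true iff the walk exits the grid
def chaseB (hangar : List String) (n m : Nat) : Nat → Int × Int → Bool
  | 0, _ => false
  | k + 1, c =>
    let nxt := pvStep hangar c
    if pvInBb n m nxt then chaseB hangar n m k nxt else true

def solution_alt (hangar : List String) : Int :=
  let n := hangar.length
  let m := (hangar.headD "").length
  (List.range n).foldl
    (fun acc (i : Nat) =>
      (List.range m).foldl
        (fun acc2 (j : Nat) =>
          if chaseB hangar n m (n * m) ((i : Int), (j : Int)) then acc2 else acc2 + 1)
        acc)
    0

-- ===== PRECONDITION & SPEC =====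
-- Pre_ excludes exactly the inputs where Python A raises: the empty list (IndexError on
-- hangar[0]), a row shorter than the first row (IndexError), or a character other than
-- U/D/L/R in the first len(hangar[0]) columns (KeyError in the dx/dy dicts).
def Pre_solution (hangar : List String) : Prop :=
  hangar ≠ [] ∧ ∀ s ∈ hangar, (hangar.headD "").length ≤ s.length ∧
    ∀ j < (hangar.headD "").length, s.toList.getD j ' ' ∈ (['U', 'D', 'L', 'R'] : List Char)

instance (hangar : List String) : Decidable (Pre_solution hangar) := by
  unfold Pre_solution; infer_instance

def pvWitness_solution : List String := (["RD", "UL"])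

def Spec_solution (hangar : List String) (out : Int) : Prop := out = solution_alt hangar
instance (hangar : List String) (out : Int) : Decidable (Spec_solution hangar out) := by
  unfold Spec_solution; infer_instance

-- ===== CLAIM (what is proved, stated in full; the proofs are below) =====
def Claim_equal_solution : Prop := ∀ (hangar : List String), Dom_solution hangar → Pre_solution hangar → Spec_solution hangar (solution hangar)

-- ===== LEMMAS AND PROOFS =====

-- the walk from c eventually leaves the grid
def pvEsc (f : Int × Int → Int × Int) (inb : Int × Int → Bool) (c : Int × Int) : Prop :=
  ∃ j, 1 ≤ j ∧ inb (f^[j] c) = false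

-- what dfs returns at an arbitrary (possibly out-of-bounds) cell
def pvEscOr (f : Int × Int → Int × Int) (inb : Int × Int → Bool) (c : Int × Int) : Prop :=
  inb c = false ∨ pvEsc f inb c

def pvShaped (n m : Nat) (g : List (List Bool)) : Prop :=
  g.length = n ∧ ∀ r ∈ g, r.length = m

def pvUCount (g : List (List Bool)) : Nat := (g.map (fun r => r.count false)).sum

-- the dfs state invariant: S is the recursion stack, most recent first
def pvInv (hangar : List String) (n m : Nat) (V C : List (List Bool))
    (S : List (Int × Int)) : Prop :=
  pvShaped n m V ∧ pvShaped n m C ∧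
  List.IsChain (fun a b => pvStep hangar b = a) S ∧
  (∀ c ∈ S, pvInBb n m c = true ∧ pvGget V c = true ∧ pvGget C c = false) ∧
  (∀ c, pvInBb n m c = true → pvGget V c = true → c ∉ S →
    (pvGget C c = true ↔ pvEsc (pvStep hangar) (pvInBb n m) c)) ∧
  (∀ c, pvInBb n m c = true → pvGget V c = false → pvGget C c = false)

lemma pvInBb_iff (n m : Nat) (c : Int × Int) :
    pvInBb n m c = true ↔ 0 ≤ c.1 ∧ c.1 < (n : Int) ∧ 0 ≤ c.2 ∧ c.2 < (m : Int) := by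
  simp [pvInBb, and_assoc]

lemma gget_set_self (n m : Nat) (g : List (List Bool)) (c : Int × Int)
    (hs : pvShaped n m g) (hc : pvInBb n m c = true) (b : Bool) :
    pvGget (pvGset g c b) c = b := by
  obtain ⟨h1, h2, h3, h4⟩ := (pvInBb_iff n m c).mp hc
  have hi : c.1.toNat < g.length := by have := hs.1; omega
  have hrow : g.getD c.1.toNat [] = g[c.1.toNat] := by
    simp [List.getD_eq_getElem?_getD, List.getElem?_eq_getElem hi]
  have hlen : g[c.1.toNat].length = m := hs.2 _ (List.getElem_mem hi)
  have hj : c.2.toNat < (g.getD c.1.toNat []).length := by rw [hrow, hlen]; omega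
  unfold pvGget pvGset
  rw [List.getD_eq_getElem?_getD (l := g.set _ _), List.getElem?_set_self (by simpa using hi),
    Option.getD_some, List.getD_eq_getElem?_getD, List.getElem?_set_self (by simpa using hj),
    Option.getD_some]

lemma gget_set_other (n m : Nat) (g : List (List Bool)) (c c' : Int × Int)
    (hc : pvInBb n m c = true) (hc' : pvInBb n m c' = true) (hne : c' ≠ c) (b : Bool) :
    pvGget (pvGset g c b) c' = pvGget g c' := by
  obtain ⟨h1, h2, h3, h4⟩ := (pvInBb_iff n m c).mp hc
  obtain ⟨h1', h2', h3', h4'⟩ := (pvInBb_iff n m c').mp hc'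
  unfold pvGget pvGset
  by_cases hrow : c'.1.toNat = c.1.toNat
  · have hcol : c'.2.toNat ≠ c.2.toNat := by
      intro hcc
      exact hne (Prod.ext (by omega) (by omega))
    by_cases hi : c.1.toNat < g.length
    · rw [hrow, List.getD_eq_getElem?_getD (l := g.set _ _), List.getElem?_set_self (by simpa using hi),
        Option.getD_some, List.getD_eq_getElem?_getD (l := (g.getD c.1.toNat []).set _ _),
        List.getElem?_set_ne (Ne.symm hcol), ← List.getD_eq_getElem?_getD]
    · rw [List.set_eq_of_length_le (by omega)]
  · rw [List.getD_eq_getElem?_getD (l := g.set _ _), List.getElem?_set_ne (by omega),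
      ← List.getD_eq_getElem?_getD]

lemma shaped_set (n m : Nat) (g : List (List Bool)) (c : Int × Int)
    (hs : pvShaped n m g) (b : Bool) : pvShaped n m (pvGset g c b) := by
  by_cases hi : c.1.toNat < g.length
  · obtain ⟨hl, hr⟩ := hs
    refine ⟨by simp [pvGset, hl], ?_⟩
    intro r hmem
    rw [pvGset] at hmem
    rcases List.mem_or_eq_of_mem_set hmem with h | h
    · exact hr r h
    · subst h
      rw [List.length_set]
      have hD : g.getD c.1.toNat [] = g[c.1.toNat] := by
        simp [List.getD_eq_getElem?_getD, List.getElem?_eq_getElem hi]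
      rw [hD]; exact hr _ (List.getElem_mem hi)
  · rw [pvGset, List.set_eq_of_length_le (by omega)]; exact hs

lemma count_false_set_true (r : List Bool) (j : Nat) (hj : j < r.length)
    (hf : r.getD j false = false) : (r.set j true).count false + 1 = r.count false := by
  induction r generalizing j with
  | nil => simp at hj
  | cons a t ih =>
    cases j with
    | zero =>
      simp only [List.getD_eq_getElem?_getD] at hf
      simp at hf
      subst hf
      simp [List.set]
    | succ j =>
      simp only [List.set, List.count_cons]
      have := ih j (by simpa using hj) (by simpa using hf)
      omega

lemma ucount_set_true (n m : Nat) (g : List (List Bool)) (c : Int × Int)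
    (hs : pvShaped n m g) (hc : pvInBb n m c = true) (hf : pvGget g c = false) :
    pvUCount (pvGset g c true) + 1 = pvUCount g := by
  obtain ⟨h1, h2, h3, h4⟩ := (pvInBb_iff n m c).mp hc
  have hi : c.1.toNat < g.length := by have := hs.1; omega
  have hrow : g.getD c.1.toNat [] = g[c.1.toNat] := by
    simp [List.getD_eq_getElem?_getD, List.getElem?_eq_getElem hi]
  have hlen : g[c.1.toNat].length = m := hs.2 _ (List.getElem_mem hi)
  have hj : c.2.toNat < (g.getD c.1.toNat []).length := by rw [hrow, hlen]; omega
  have hcnt := count_false_set_true (g.getD c.1.toNat []) c.2.toNat hj hf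
  unfold pvUCount pvGset
  rw [List.set_eq_take_append_cons_drop, if_pos hi]
  conv_rhs => rw [← List.take_append_drop c.1.toNat g, ← List.getElem_cons_drop hi]
  rw [List.map_append, List.map_append, List.sum_append, List.sum_append,
    List.map_cons, List.map_cons, List.sum_cons, List.sum_cons, ← hrow]
  omega

lemma ucount_le (n m : Nat) (g : List (List Bool)) (hs : pvShaped n m g) :
    pvUCount g ≤ n * m := by
  obtain ⟨hl, hr⟩ := hs
  subst hl
  induction g with
  | nil => simp [pvUCount]
  | cons a t ih =>
    have ha := hr a (by simp)
    have h1 : a.count false ≤ m := by rw [← ha]; exact List.count_le_length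
    have h2 := ih (fun r hrm => hr r (by simp [hrm]))
    simp only [pvUCount, List.map_cons, List.sum_cons, List.length_cons] at *
    calc a.count false + (t.map fun r => r.count false).sum ≤ m + t.length * m := by omega
    _ = (t.length + 1) * m := by ring

lemma noEsc_of_closed (f : Int × Int → Int × Int) (inb : Int × Int → Bool)
    (T : List (Int × Int)) (hcl : ∀ d ∈ T, inb d = true ∧ f d ∈ T)
    (c : Int × Int) (hc : c ∈ T) : ¬ pvEsc f inb c := by
  have key : ∀ j, f^[j] c ∈ T := by
    intro j
    induction j with
    | zero => simpa
    | succ j ih => rw [Function.iterate_succ_apply']; exact (hcl _ ih).2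
  rintro ⟨j, _, hj⟩
  have := (hcl _ (key j)).1
  rw [this] at hj
  exact Bool.true_eq_false.mp hj

lemma cycle_noEsc (f : Int × Int → Int × Int) (inb : Int × Int → Bool)
    (t : Int × Int) (S : List (Int × Int)) (c : Int × Int)
    (hch : List.IsChain (fun a b => f b = a) (t :: S)) (hmem : c ∈ t :: S)
    (hf : f t = c) (hin : ∀ d ∈ t :: S, inb d = true) : ¬ pvEsc f inb c := by
  set L := t :: S with hL
  have hk : L.idxOf c < L.length := List.idxOf_lt_length_of_mem hmem
  have hkc : L[L.idxOf c] = c := List.getElem_idxOf hk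
  set k := L.idxOf c with hkdef
  set T := L.take (k + 1) with hT
  have hTlen : T.length = k + 1 := by
    rw [hT, List.length_take]; omega
  have hTget : ∀ (i : Nat) (h : i < T.length), T[i] = L[i]'(by rw [hTlen] at h; omega) := by
    intro i h; simp [hT, List.getElem_take]
  have hcT : c ∈ T := by
    have : T[k]'(by omega) = c := by rw [hTget k (by omega)]; exact hkc
    rw [← this]; exact List.getElem_mem _
  have hchain := List.isChain_iff_getElem.mp hch
  refine noEsc_of_closed f inb T ?_ c hcT
  intro d hd
  obtain ⟨i, hilt, hieq⟩ := List.mem_iff_getElem.mp hd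
  constructor
  · exact hin d (List.mem_of_mem_take (by rw [← hieq]; exact List.getElem_mem _))
  · cases i with
    | zero =>
      have hdt : d = t := by
        rw [← hieq, hTget 0 hilt]; rfl
      rw [hdt, hf]; exact hcT
    | succ i =>
      have hlt : i + 1 < L.length := by
        have := hilt; rw [hTlen] at this; omega
      have := hchain i hlt
      have hd1 : d = L[i+1] := by rw [← hieq, hTget (i+1) hilt]
      rw [hd1, this]
      have : T[i]'(by rw [hTlen] at hilt ⊢; omega) = L[i] := hTget i _
      rw [← this]; exact List.getElem_mem _

lemma esc_iff_step (f : Int × Int → Int × Int) (inb : Int × Int → Bool) (c : Int × Int) :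
    pvEsc f inb c ↔ (inb (f c) = false ∨ pvEsc f inb (f c)) := by
  constructor
  · rintro ⟨j, hj1, hj⟩
    rcases Nat.lt_or_ge j 2 with h2 | h2
    · left
      have : j = 1 := by omega
      subst this; simpa using hj
    · right
      refine ⟨j - 1, by omega, ?_⟩
      have e : (j - 1) + 1 = j := by omega
      have hiter : f^[j] c = f^[j - 1] (f c) := by
        conv_lhs => rw [← e]
        rw [Function.iterate_succ_apply]
      rw [← hiter]; exact hj
  · rintro (h | ⟨j, hj1, hj⟩)
    · exact ⟨1, le_refl _, by simpa using h⟩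
    · exact ⟨j + 1, by omega, by rw [Function.iterate_succ_apply]; exact hj⟩

lemma dfsA_spec (hangar : List String) (n m : Nat) :
    ∀ (fuel : Nat) (V C : List (List Bool)) (S : List (Int × Int)) (x y : Int)
      (b : Bool) (V' C' : List (List Bool)),
    pvInv hangar n m V C S →
    (∀ t ∈ S.head?, pvStep hangar t = (x, y)) →
    pvUCount V < fuel →
    dfsA hangar n m fuel (V, C) x y = (b, (V', C')) →
    ((b = true ↔ pvEscOr (pvStep hangar) (pvInBb n m) (x, y)) ∧
     pvInv hangar n m V' C' S ∧
     (∀ c, pvInBb n m c = true → pvGget V c = true → pvGget V' c = true) ∧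
     pvUCount V' ≤ pvUCount V) := by
  intro fuel
  induction fuel with
  | zero =>
    intro V C S x y b V' C' _ _ hfuel _
    omega
  | succ fuel ih =>
    intro V C S x y b V' C' hInv hlink hfuel heq
    obtain ⟨hVsh, hCsh, hchain, hstack, hvis, hunvis⟩ := hInv
    simp only [dfsA] at heq
    by_cases hib : pvInBb n m (x, y) = true
    · rw [if_pos hib] at heq
      by_cases hgv : pvGget V (x, y) = true
      · rw [if_pos hgv] at heq
        injection heq with h1 h2
        injection h2 with h2a h2b
        subst h1 h2a h2b
        refine ⟨?_, ⟨hVsh, hCsh, hchain, hstack, hvis, hunvis⟩, fun c _ h => h, le_refl _⟩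
        by_cases hmem : (x, y) ∈ S
        · have hCfalse := (hstack _ hmem).2.2
          rw [hCfalse]
          cases S with
          | nil => simp at hmem
          | cons t S' =>
            have hft : pvStep hangar t = (x, y) := hlink t (by simp)
            have hnoesc := cycle_noEsc (pvStep hangar) (pvInBb n m) t S' (x, y)
              hchain hmem hft (fun d hd => (hstack d hd).1)
            simp [pvEscOr, hib, hnoesc]
        · have hiff := hvis _ hib hgv hmem
          have hred : pvEscOr (pvStep hangar) (pvInBb n m) (x, y) ↔
              pvEsc (pvStep hangar) (pvInBb n m) (x, y) := by simp [pvEscOr, hib]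
          rw [hred]
          exact hiff
      · rw [if_neg hgv] at heq
        have hgvF : pvGget V (x, y) = false := by simpa using hgv
        have hxyS : (x, y) ∉ S := by
          intro hmem
          have := (hstack _ hmem).2.1
          rw [this] at hgvF
          exact absurd hgvF (by simp)
        obtain ⟨b2, V2, C2, hrec⟩ : ∃ b2 V2 C2,
            dfsA hangar n m fuel (pvGset V (x, y) true, C)
              (pvStep hangar (x, y)).1 (pvStep hangar (x, y)).2 = (b2, (V2, C2)) :=
          ⟨_, _, _, rfl⟩
        rw [hrec] at heq
        injection heq with h1 h2
        injection h2 with h2a h2b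
        subst h1 h2a h2b
        have hV1sh := shaped_set n m V (x, y) hVsh true
        have hV1xy : pvGget (pvGset V (x, y) true) (x, y) = true :=
          gget_set_self n m V (x, y) hVsh hib true
        have hInv1 : pvInv hangar n m (pvGset V (x, y) true) C ((x, y) :: S) := by
          refine ⟨hV1sh, hCsh, List.isChain_cons.mpr ⟨hlink, hchain⟩, ?_, ?_, ?_⟩
          · intro c hc
            rcases List.mem_cons.mp hc with rfl | hc'
            · exact ⟨hib, hV1xy, hunvis _ hib hgvF⟩
            · have hsc := hstack _ hc'
              have hne : c ≠ (x, y) := by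
                intro h'; subst h'
                rw [hsc.2.1] at hgvF; exact absurd hgvF (by simp)
              exact ⟨hsc.1, by
                rw [gget_set_other n m V (x, y) c hib hsc.1 hne]; exact hsc.2.1, hsc.2.2⟩
          · intro c hcib hv1 hnot
            have hne : c ≠ (x, y) := fun h' => hnot (h' ▸ List.mem_cons_self)
            rw [gget_set_other n m V (x, y) c hib hcib hne] at hv1
            exact hvis c hcib hv1 (fun h' => hnot (List.mem_cons_of_mem _ h'))
          · intro c hcib hv1f
            have hne : c ≠ (x, y) := by
              intro h'; subst h'
              rw [hV1xy] at hv1f; exact absurd hv1f (by simp)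
            rw [gget_set_other n m V (x, y) c hib hcib hne] at hv1f
            exact hunvis c hcib hv1f
        have hlink1 : ∀ t ∈ ((x, y) :: S).head?, pvStep hangar t =
            ((pvStep hangar (x, y)).1, (pvStep hangar (x, y)).2) := by
          intro t ht
          simp only [List.head?_cons, Option.mem_some_iff] at ht
          subst ht; rfl
        have hcdec := ucount_set_true n m V (x, y) hVsh hib hgvF
        obtain ⟨hbiff, hInv2, hmono2, hcnt2⟩ :=
          ih (pvGset V (x, y) true) C ((x, y) :: S) (pvStep hangar (x, y)).1
            (pvStep hangar (x, y)).2 b2 V2 C2 hInv1 hlink1 (by omega) hrec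
        obtain ⟨hVsh2, hCsh2, hchain2, hstack2, hvis2, hunvis2⟩ := hInv2
        have hV2xy : pvGget V2 (x, y) = true :=
          (hstack2 (x, y) List.mem_cons_self).2.1
        have hbx : b2 = true ↔ pvEscOr (pvStep hangar) (pvInBb n m) (x, y) := by
          rw [hbiff]
          have h1 : pvEscOr (pvStep hangar) (pvInBb n m) (x, y) ↔
              pvEsc (pvStep hangar) (pvInBb n m) (x, y) := by simp [pvEscOr, hib]
          rw [h1, esc_iff_step]
          exact Iff.rfl
        refine ⟨hbx, ⟨hVsh2, shaped_set n m C2 (x, y) hCsh2 b2, ?_, ?_, ?_, ?_⟩, ?_, ?_⟩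
        · exact (List.isChain_cons.mp hchain2).2
        · intro c hc
          have hsc2 := hstack2 c (List.mem_cons_of_mem _ hc)
          have hne : c ≠ (x, y) := fun h' => hxyS (h' ▸ hc)
          exact ⟨hsc2.1, hsc2.2.1, by
            rw [gget_set_other n m C2 (x, y) c hib hsc2.1 hne]; exact hsc2.2.2⟩
        · intro c hcib hv2 hnot
          by_cases hceq : c = (x, y)
          · rw [hceq, gget_set_self n m C2 (x, y) hCsh2 hib b2, hbx]
            simp [pvEscOr, hib]
          · rw [gget_set_other n m C2 (x, y) c hib hcib hceq]
            exact hvis2 c hcib hv2 (by simp [hceq, hnot])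
        · intro c hcib hv2f
          have hceq : c ≠ (x, y) := by
            intro h'; subst h'
            rw [hV2xy] at hv2f; exact absurd hv2f (by simp)
          rw [gget_set_other n m C2 (x, y) c hib hcib hceq]
          exact hunvis2 c hcib hv2f
        · intro c hcib hvc
          refine hmono2 c hcib ?_
          by_cases hceq : c = (x, y)
          · subst hceq; exact hV1xy
          · rw [gget_set_other n m V (x, y) c hib hcib hceq]; exact hvc
        · show pvUCount V2 ≤ pvUCount V
          omega
    · rw [if_neg hib] at heq
      injection heq with h1 h2
      injection h2 with h2a h2b
      subst h1 h2a h2b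
      have hibf : pvInBb n m (x, y) = false := by simpa using hib
      exact ⟨by simp [pvEscOr, hibf], ⟨hVsh, hCsh, hchain, hstack, hvis, hunvis⟩,
        fun c _ h => h, le_refl _⟩

lemma chaseB_spec (hangar : List String) (n m : Nat) :
    ∀ (k : Nat) (c : Int × Int), chaseB hangar n m k c = true ↔
      ∃ j, 1 ≤ j ∧ j ≤ k ∧ pvInBb n m ((pvStep hangar)^[j] c) = false := by
  intro k
  induction k with
  | zero =>
    intro c
    simp only [chaseB]
    constructor
    · intro h; exact absurd h (by simp)
    · rintro ⟨j, h1, h2, _⟩; omega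
  | succ k ih =>
    intro c
    simp only [chaseB]
    by_cases h : pvInBb n m (pvStep hangar c) = true
    · rw [if_pos h, ih]
      constructor
      · rintro ⟨j, h1, h2, h3⟩
        refine ⟨j + 1, by omega, by omega, ?_⟩
        rw [Function.iterate_succ_apply]; exact h3
      · rintro ⟨j, h1, h2, h3⟩
        have hj2 : 2 ≤ j := by
          rcases Nat.lt_or_ge j 2 with h' | h'
          · have : j = 1 := by omega
            subst this
            simp only [Function.iterate_one] at h3
            rw [h3] at h; exact absurd h (by simp)
          · exact h'
        refine ⟨j - 1, by omega, by omega, ?_⟩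
        have e : (j - 1) + 1 = j := by omega
        have hiter : (pvStep hangar)^[j] c = (pvStep hangar)^[j - 1] (pvStep hangar c) := by
          conv_lhs => rw [← e]
          rw [Function.iterate_succ_apply]
        rw [← hiter]; exact h3
    · rw [if_neg h]
      simp only [true_iff]
      exact ⟨1, by omega, by omega, by simpa using Bool.not_eq_true _ ▸ (by simpa using h)⟩

lemma all_inb_of_bounded (n m : Nat) (f : Int × Int → Int × Int) (c : Int × Int)
    (h : ∀ j, j ≤ n * m → pvInBb n m (f^[j] c) = true) :
    ∀ j, pvInBb n m (f^[j] c) = true := by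
  have maps : ∀ j ∈ Finset.range (n * m + 1),
      f^[j] c ∈ (Finset.Ico (0 : Int) n) ×ˢ (Finset.Ico (0 : Int) m) := by
    intro j hj
    have := h j (by have := Finset.mem_range.mp hj; omega)
    obtain ⟨a1, a2, a3, a4⟩ := (pvInBb_iff n m _).mp this
    simp only [Finset.mem_product, Finset.mem_Ico]
    exact ⟨⟨a1, a2⟩, ⟨a3, a4⟩⟩
  have hcard : ((Finset.Ico (0 : Int) n) ×ˢ (Finset.Ico (0 : Int) m)).card < (Finset.range (n * m + 1)).card := by
    rw [Finset.card_product, Int.card_Ico, Int.card_Ico, Finset.card_range]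
    simp
  obtain ⟨a, ha, b, hb, hne, heq⟩ :=
    Finset.exists_ne_map_eq_of_card_lt_of_maps_to hcard maps
  have hab : ∃ a b : Nat, a < b ∧ b ≤ n * m ∧ f^[b] c = f^[a] c := by
    rcases Nat.lt_or_ge a b with h' | h'
    · exact ⟨a, b, h', by have := Finset.mem_range.mp hb; omega, heq.symm⟩
    · have : b < a := by omega
      exact ⟨b, a, this, by have := Finset.mem_range.mp ha; omega, heq⟩
  obtain ⟨a', b', hab', hble, heq'⟩ := hab
  have reduce : ∀ j, ∃ i, i < b' ∧ f^[j] c = f^[i] c := by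
    intro j
    induction j using Nat.strong_induction_on with
    | _ j ih =>
      rcases Nat.lt_or_ge j b' with hj | hj
      · exact ⟨j, hj, rfl⟩
      · have hstep : f^[j] c = f^[j - (b' - a')] c := by
          have e1 : j = (j - (b' - a') - a') + b' := by omega
          have e2 : j - (b' - a') - a' + a' = j - (b' - a') := by omega
          conv_lhs => rw [e1]
          rw [Function.iterate_add_apply, heq', ← Function.iterate_add_apply, e2]
        obtain ⟨i, hi, he⟩ := ih (j - (b' - a')) (by omega)
        exact ⟨i, hi, hstep.trans he⟩
  intro j
  obtain ⟨i, hi, he⟩ := reduce j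
  rw [he]
  exact h i (by omega)

lemma esc_bounded (hangar : List String) (n m : Nat) (c : Int × Int)
    (hc : pvInBb n m c = true) :
    pvEsc (pvStep hangar) (pvInBb n m) c ↔
      ∃ j, 1 ≤ j ∧ j ≤ n * m ∧ pvInBb n m ((pvStep hangar)^[j] c) = false := by
  constructor
  · intro hesc
    by_contra hne
    push Not at hne
    have hall : ∀ j, j ≤ n * m → pvInBb n m ((pvStep hangar)^[j] c) = true := by
      intro j hj
      cases j with
      | zero => simpa using hc
      | succ j' =>
        have := hne (j' + 1) (by omega) hj
        simpa using this
    have hAll := all_inb_of_bounded n m (pvStep hangar) c hall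
    obtain ⟨j, hj1, hj⟩ := hesc
    rw [hAll j] at hj
    exact absurd hj (by simp)
  · rintro ⟨j, h1, h2, h3⟩
    exact ⟨j, h1, h3⟩

lemma cell_eq (hangar : List String) (n m : Nat) (i j : Nat) (hi : i < n) (hj : j < m)
    (V C : List (List Bool)) (hInv : pvInv hangar n m V C [])
    (b : Bool) (V' C' : List (List Bool))
    (heq : dfsA hangar n m (n * m + 1) (V, C) (i : Int) (j : Int) = (b, (V', C'))) :
    b = chaseB hangar n m (n * m) ((i : Int), (j : Int)) ∧ pvInv hangar n m V' C' [] := by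
  have hib : pvInBb n m ((i : Int), (j : Int)) = true := by
    rw [pvInBb_iff]
    refine ⟨?_, ?_, ?_, ?_⟩
    · show (0 : Int) ≤ (i : Int); positivity
    · show ((i : Int)) < ((n : Int)); exact_mod_cast hi
    · show (0 : Int) ≤ (j : Int); positivity
    · show ((j : Int)) < ((m : Int)); exact_mod_cast hj
  obtain ⟨hbiff, hInv', _, _⟩ := dfsA_spec hangar n m (n * m + 1) V C [] (i : Int) (j : Int)
    b V' C' hInv (by intro t ht; simp at ht) (by
      have := ucount_le n m V hInv.1
      omega) heq
  refine ⟨?_, hInv'⟩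
  have hiff : (b = true) ↔ (chaseB hangar n m (n * m) ((i : Int), (j : Int)) = true) := by
    rw [hbiff, chaseB_spec]
    have h1 : pvEscOr (pvStep hangar) (pvInBb n m) ((i : Int), (j : Int)) ↔
        pvEsc (pvStep hangar) (pvInBb n m) ((i : Int), (j : Int)) := by
      simp [pvEscOr, hib]
    rw [h1, esc_bounded hangar n m _ hib]
  cases b with
  | false =>
    cases hch : chaseB hangar n m (n * m) ((i : Int), (j : Int)) with
    | false => rfl
    | true => exact absurd (hiff.mpr hch) (by simp)
  | true => exact (hiff.mp rfl).symm

lemma inner_fold (hangar : List String) (n m : Nat) (i : Nat) (hi : i < n) :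
    ∀ (js : List Nat) (acc : Int) (V C : List (List Bool)),
    (∀ j ∈ js, j < m) → pvInv hangar n m V C [] →
    ((js.foldl (pvStepA hangar n m i) (acc, (V, C))).1 =
      js.foldl (fun acc2 (j : Nat) =>
        if chaseB hangar n m (n * m) ((i : Int), (j : Int)) then acc2 else acc2 + 1) acc ∧
     pvInv hangar n m (js.foldl (pvStepA hangar n m i) (acc, (V, C))).2.1
       (js.foldl (pvStepA hangar n m i) (acc, (V, C))).2.2 []) := by
  intro js
  induction js with
  | nil =>
    intro acc V C _ hInv
    exact ⟨rfl, hInv⟩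
  | cons j js ihj =>
    intro acc V C hmem hInv
    obtain ⟨b, V', C', hrec⟩ : ∃ b V' C',
        dfsA hangar n m (n * m + 1) (V, C) (i : Int) (j : Int) = (b, (V', C')) :=
      ⟨_, _, _, rfl⟩
    obtain ⟨hb, hInv'⟩ := cell_eq hangar n m i j hi (hmem j (by simp)) V C hInv b V' C' hrec
    have hstep : pvStepA hangar n m i (acc, (V, C)) j =
        (acc + (if b then 0 else 1), (V', C')) := by
      simp [pvStepA, hrec]
    have hacc : acc + (if b then (0 : Int) else 1) =
        (if chaseB hangar n m (n * m) ((i : Int), (j : Int)) then acc else acc + 1) := by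
      rw [← hb]
      cases b <;> simp
    simp only [List.foldl_cons, hstep]
    obtain ⟨ih1, ih2⟩ := ihj (acc + (if b then 0 else 1)) V' C'
      (fun j' hj' => hmem j' (by simp [hj'])) hInv'
    exact ⟨by rw [ih1, hacc], ih2⟩

lemma outer_fold (hangar : List String) (n m : Nat) :
    ∀ (is : List Nat) (acc : Int) (V C : List (List Bool)),
    (∀ i ∈ is, i < n) → pvInv hangar n m V C [] →
    (is.foldl (fun acc i => (List.range m).foldl (pvStepA hangar n m i) acc) (acc, (V, C))).1 =
      is.foldl (fun acc (i : Nat) => (List.range m).foldl (fun acc2 (j : Nat) =>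
        if chaseB hangar n m (n * m) ((i : Int), (j : Int)) then acc2 else acc2 + 1) acc) acc := by
  intro is
  induction is with
  | nil =>
    intro acc V C _ _
    rfl
  | cons i is ihi =>
    intro acc V C hmem hInv
    obtain ⟨h1, h2⟩ := inner_fold hangar n m i (hmem i (by simp)) (List.range m) acc V C
      (fun j hj => List.mem_range.mp hj) hInv
    simp only [List.foldl_cons]
    have heta : (List.range m).foldl (pvStepA hangar n m i) (acc, (V, C)) =
        (((List.range m).foldl (pvStepA hangar n m i) (acc, (V, C))).1,
         (((List.range m).foldl (pvStepA hangar n m i) (acc, (V, C))).2.1,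
          ((List.range m).foldl (pvStepA hangar n m i) (acc, (V, C))).2.2)) := rfl
    rw [heta, h1]
    exact ihi _ _ _ (fun i' hi' => hmem i' (by simp [hi'])) h2

lemma inv_init (hangar : List String) (n m : Nat) :
    pvInv hangar n m (List.replicate n (List.replicate m false))
      (List.replicate n (List.replicate m false)) [] := by
  have hget : ∀ c : Int × Int,
      pvGget (List.replicate n (List.replicate m false)) c = false := by
    intro c
    unfold pvGget
    by_cases hi : c.1.toNat < n
    · rw [List.getD_replicate _ hi]
      by_cases hj : c.2.toNat < m
      · rw [List.getD_replicate _ hj]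
      · have hnone : (List.replicate m false)[c.2.toNat]? = none :=
          List.getElem?_eq_none_iff.mpr (by simpa using Nat.le_of_not_lt hj)
        simp [List.getD_eq_getElem?_getD, hnone]
    · have hnone : (List.replicate n (List.replicate m false))[c.1.toNat]? = none :=
        List.getElem?_eq_none_iff.mpr (by simpa using Nat.le_of_not_lt hi)
      simp [List.getD_eq_getElem?_getD, hnone]
  have hshape : pvShaped n m (List.replicate n (List.replicate m false)) := by
    refine ⟨by simp, ?_⟩
    intro r hr
    rw [List.eq_of_mem_replicate hr]; simp
  refine ⟨hshape, hshape, by simp, by simp, ?_, ?_⟩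
  · intro c _ hv _
    rw [hget c] at hv; exact absurd hv (by simp)
  · intro c _ _
    exact hget c

-- ===== VERDICT (by name: the statement is the Claim_ definition above) =====
theorem solution_spec : Claim_equal_solution := by
  intro hangar _ _
  unfold Spec_solution solution solution_alt
  exact outer_fold hangar hangar.length (hangar.headD "").length
    (List.range hangar.length) 0 _ _
    (fun i hi => List.mem_range.mp hi) (inv_init _ _ _)
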